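-- pv_equiv track=rewrite | github.com/javierobarbosa/algorithms | Two Pointers/apply_ops_array.py | apply_operations_2
-- ===== SOURCE A (Python) =====
-- from typing import List
--
-- def apply_operations_2(nums: List[int]) -> List[int]:
--     end = len(nums)
--     j = 0
--     for i in range(end):
--         if i < end - 1 and nums[i] == nums[i+1]:
--             nums[i] *= 2
--             nums[i+1] = 0
--         if nums[i] != 0:
--             if i != j:
--                 nums[i], nums[j] = nums[j], nums[i]
--             j += 1
--     return nums
-- ===== SOURCE B (Python) =====
-- from typing import List
--
-- def apply_operations_2(nums: List[int]) -> List[int]: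
--     # pass 1: sequential combine, carry-based single scan building a new list
--     out = []
--     carry = None
--     for x in nums:
--         if carry is None:
--             carry = x
--         elif carry == x:
--             out.append(2 * carry)
--             carry = 0
--         else:
--             out.append(carry)
--             carry = x
--     if carry is not None:
--         out.append(carry)
--     # pass 2: keep nonzeros, pad with zeros; write back in place
--     kept = [x for x in out if x != 0]
--     nums[:] = kept + [0] * (len(nums) - len(kept))
--     return nums
-- ===== Notes on version B (the rewrite author's own statement) =====
-- stated objective: simpler
-- what changed: A's single fused loop (combine-with-next interleaved with an in-place two-pointer zero shift) is split into two plain passes: a carry-based scan that builds the combined list, then a filter of the nonzeros padded with zeros; the writeback keeps A's in-place mutation.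
import Mathlib
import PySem

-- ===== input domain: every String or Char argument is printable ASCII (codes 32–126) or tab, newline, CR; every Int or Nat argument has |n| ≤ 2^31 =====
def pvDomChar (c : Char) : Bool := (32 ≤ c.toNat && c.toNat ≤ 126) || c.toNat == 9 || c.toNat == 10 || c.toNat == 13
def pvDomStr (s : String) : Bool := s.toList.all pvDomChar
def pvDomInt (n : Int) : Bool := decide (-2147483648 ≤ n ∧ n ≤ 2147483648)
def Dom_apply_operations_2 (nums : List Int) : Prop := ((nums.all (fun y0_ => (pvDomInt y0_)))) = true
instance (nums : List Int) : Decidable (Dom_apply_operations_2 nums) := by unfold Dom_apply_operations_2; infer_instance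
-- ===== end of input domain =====

-- B replaces A's fused combine-and-shift loop by a recursive combine pass followed by
-- filter-nonzeros-then-pad-with-zeros (simpler decomposition; return value only — both
-- Pythons leave the argument list holding the returned contents).

-- ===== PORT A =====
-- the body of A's for-loop (n = len(nums), captured before the loop; state = (nums, j));
-- all Python index accesses are in range, so getD 0 is exact here
def aBody (n : Nat) (st : List Int × Nat) (i : Nat) : List Int × Nat :=
  let xs := st.1
  let j := st.2
  let xs := if i < n - 1 ∧ xs.getD i 0 = xs.getD (i+1) 0 then
      (xs.set i (2 * xs.getD i 0)).set (i+1) 0 else xs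
  if xs.getD i 0 ≠ 0 then
    (if i ≠ j then (xs.set i (xs.getD j 0)).set j (xs.getD i 0) else xs, j + 1)
  else (xs, j)

def apply_operations_2 (nums : List Int) : List Int :=
  ((List.range nums.length).foldl (aBody nums.length) (nums, 0)).1

-- ===== PORT B =====
-- pass 1 of Source B: carry-based scan; state = (out, carry)
def combStep (st : List Int × Option Int) (x : Int) : List Int × Option Int :=
  match st.2 with
  | none => (st.1, some x)
  | some c => if c = x then (st.1 ++ [2*c], some 0) else (st.1 ++ [c], some x)

def combinePass (nums : List Int) : List Int :=
  let st := nums.foldl combStep ([], none)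
  match st.2 with
  | none => st.1
  | some c => st.1 ++ [c]

def apply_operations_2_alt (nums : List Int) : List Int :=
  let kept := (combinePass nums).filter (· ≠ 0)
  kept ++ List.replicate (nums.length - kept.length) 0

-- ===== PRECONDITION & SPEC =====
def Spec_apply_operations_2 (nums : List Int) (out : List Int) : Prop := out = apply_operations_2_alt nums
instance (nums : List Int) (out : List Int) : Decidable (Spec_apply_operations_2 nums out) := by unfold Spec_apply_operations_2; infer_instance

-- ===== CLAIM (what is proved, stated in full; the proofs are below) =====
def Claim_equal_apply_operations_2 : Prop := ∀ (nums : List Int), Dom_apply_operations_2 nums → Spec_apply_operations_2 nums (apply_operations_2 nums)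

-- ===== LEMMAS AND PROOFS =====

-- recursive description of the combine pass (proof-layer helper)
def combine : List Int → List Int
  | [] => []
  | [a] => [a]
  | a :: b :: rest => if a = b then 2*a :: combine (0 :: rest) else a :: combine (b :: rest)
termination_by xs => xs.length

-- head and tail of one sequential combine step
def combHead (a : Int) (T : List Int) : Int :=
  match T with | [] => a | b :: _ => if a = b then 2*a else a
def combTail (a : Int) (T : List Int) : List Int :=
  match T with | [] => [] | b :: T' => (if a = b then 0 else b) :: T'

lemma combine_step (a : Int) (T : List Int) :
    combine (a :: T) = combHead a T :: combine (combTail a T) := by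
  cases T with
  | nil => simp [combine, combHead, combTail]
  | cons b T' =>
    by_cases h : a = b <;> simp [combine, combHead, combTail, h]


lemma combStep_run (T : List Int) : ∀ (acc : List Int) (c : Int),
    (match (T.foldl combStep (acc, some c)).2 with
     | none => (T.foldl combStep (acc, some c)).1
     | some d => (T.foldl combStep (acc, some c)).1 ++ [d])
    = acc ++ combine (c :: T) := by
  induction T with
  | nil => intro acc c; simp [combine]
  | cons b r ih =>
    intro acc c
    rw [List.foldl_cons]
    by_cases hcb : c = b
    · rw [show combStep (acc, some c) b = (acc ++ [2*c], some 0) by simp [combStep, hcb]]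
      rw [ih]
      conv_rhs => rw [combine_step]
      simp [combHead, combTail, hcb]
    · rw [show combStep (acc, some c) b = (acc ++ [c], some b) by simp [combStep, hcb]]
      rw [ih]
      conv_rhs => rw [combine_step]
      simp [combHead, combTail, hcb]

lemma combinePass_eq_combine (nums : List Int) : combinePass nums = combine nums := by
  cases nums with
  | nil => simp [combinePass, combine]
  | cons a T =>
    unfold combinePass
    rw [List.foldl_cons, show combStep ([], none) a = ([], some a) by simp [combStep]]
    simpa using combStep_run T [] a

lemma combTail_length (a : Int) (T : List Int) : (combTail a T).length = T.length := by
  cases T <;> simp [combTail]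

lemma getD_head (K : List Int) (z : Nat) (a : Int) (L : List Int) :
    (K ++ List.replicate z 0 ++ a :: L).getD (K.length + z) 0 = a := by
  rw [List.getD_append_right] <;> simp

lemma getD_second (K : List Int) (z : Nat) (a : Int) (L : List Int) :
    (K ++ List.replicate z 0 ++ a :: L).getD (K.length + z + 1) 0 = L.getD 0 0 := by
  rw [List.getD_append_right] <;> simp

lemma set_head (K : List Int) (z : Nat) (a v : Int) (L : List Int) :
    (K ++ List.replicate z 0 ++ a :: L).set (K.length + z) v
    = K ++ List.replicate z 0 ++ v :: L := by
  simp


lemma set_second (K : List Int) (z : Nat) (a b v : Int) (L : List Int) :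
    (K ++ List.replicate z 0 ++ a :: b :: L).set (K.length + z + 1) v
    = K ++ List.replicate z 0 ++ a :: v :: L := by
  rw [List.set_append, if_neg (by simp)]
  have h1 : K.length + z + 1 - (K ++ List.replicate z 0).length = 1 := by simp
  rw [h1]
  simp

lemma getD_j (K : List Int) (z : Nat) (L : List Int) (hz : 0 < z) :
    (K ++ List.replicate z 0 ++ L).getD K.length 0 = 0 := by
  rw [List.getD_append _ _ _ _ (by simp; omega),
      List.getD_append_right _ _ _ _ (le_refl _)]
  cases z with
  | zero => omega
  | succ zz => simp [List.replicate_succ]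

lemma set_j (K : List Int) (zz : Nat) (L : List Int) (v : Int) :
    (K ++ List.replicate (zz+1) 0 ++ L).set K.length v
    = (K ++ [v]) ++ List.replicate zz 0 ++ L := by
  simp [List.replicate_succ]

lemma rep_shift (z : Nat) (T : List Int) :
    List.replicate z (0:Int) ++ 0 :: T = List.replicate (z+1) 0 ++ T := by
  simp [List.replicate_succ']

-- one iteration of A's loop on the canonical state shape
lemma aBody_step (n : Nat) (K T : List Int) (z : Nat) (a : Int)
    (hn : n = K.length + z + 1 + T.length) :
    aBody n (K ++ List.replicate z 0 ++ a :: T, K.length) (K.length + z)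
    = (if combHead a T ≠ 0 then
         ((K ++ [combHead a T]) ++ List.replicate z 0 ++ combTail a T, K.length + 1)
       else (K ++ List.replicate (z+1) 0 ++ combTail a T, K.length)) := by
  have phase2 : ∀ (h : Int) (T2 : List Int),
      (if (K ++ List.replicate z 0 ++ h :: T2).getD (K.length + z) 0 ≠ 0 then
        (if K.length + z ≠ K.length then
          ((K ++ List.replicate z 0 ++ h :: T2).set (K.length + z)
              ((K ++ List.replicate z 0 ++ h :: T2).getD K.length 0)).set K.length
              ((K ++ List.replicate z 0 ++ h :: T2).getD (K.length + z) 0)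
         else K ++ List.replicate z 0 ++ h :: T2, K.length + 1)
       else (K ++ List.replicate z 0 ++ h :: T2, K.length))
      = (if h ≠ 0 then ((K ++ [h]) ++ List.replicate z 0 ++ T2, K.length + 1)
         else (K ++ List.replicate (z+1) 0 ++ T2, K.length)) := by
    intro h T2
    rw [getD_head]
    by_cases hh : h = 0
    · simp [hh, rep_shift]
    · rw [if_pos hh, if_pos hh]
      cases z with
      | zero => simp
      | succ zz =>
        rw [if_pos (show K.length + (zz+1) ≠ K.length by omega),
            getD_j _ _ _ (Nat.succ_pos zz), set_head, set_j]
        simp [List.replicate_succ', List.append_assoc]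
  simp only [aBody]
  cases T with
  | nil =>
    have hc : ¬(K.length + z < n - 1 ∧
        (K ++ List.replicate z 0 ++ [a]).getD (K.length + z) 0 =
        (K ++ List.replicate z 0 ++ [a]).getD (K.length + z + 1) 0) := by
      rintro ⟨hlt, -⟩; simp at hn; omega
    rw [if_neg hc]
    simpa only [combHead, combTail] using phase2 a []
  | cons b T'' =>
    simp only [combHead, combTail]
    by_cases hab : a = b
    · rw [if_pos hab, if_pos hab]
      have hc : K.length + z < n - 1 ∧
          (K ++ List.replicate z 0 ++ a :: b :: T'').getD (K.length + z) 0 =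
          (K ++ List.replicate z 0 ++ a :: b :: T'').getD (K.length + z + 1) 0 := by
        refine ⟨by simp at hn; omega, ?_⟩
        rw [getD_head, getD_second]; simp [hab]
      rw [if_pos hc, getD_head, set_head, set_second]
      exact phase2 (2*a) (0 :: T'')
    · rw [if_neg hab, if_neg hab]
      have hc : ¬(K.length + z < n - 1 ∧
          (K ++ List.replicate z 0 ++ a :: b :: T'').getD (K.length + z) 0 =
          (K ++ List.replicate z 0 ++ a :: b :: T'').getD (K.length + z + 1) 0) := by
        rintro ⟨-, heq⟩
        rw [getD_head, getD_second] at heq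
        simp at heq
        exact hab heq
      rw [if_neg hc]
      exact phase2 a (b :: T'')

-- the loop invariant: from the canonical state, the rest of the loop produces
-- K ++ nonzeros of (combine T) ++ zero padding
lemma loop_inv (n : Nat) : ∀ (m : Nat) (T K : List Int) (z : Nat),
    T.length = m → n = K.length + z + m →
    (List.range' (K.length + z) m).foldl (aBody n) (K ++ List.replicate z 0 ++ T, K.length)
    = (K ++ (combine T).filter (· ≠ 0)
         ++ List.replicate (z + m - ((combine T).filter (· ≠ 0)).length) 0,
       K.length + ((combine T).filter (· ≠ 0)).length) := by
  intro m
  induction m with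
  | zero =>
    intro T K z hT hn
    rw [List.length_eq_zero_iff] at hT
    subst hT
    simp [combine]
  | succ m ih =>
    intro T K z hT hn
    cases T with
    | nil => simp at hT
    | cons a T' =>
      simp only [List.length_cons, Nat.succ_inj] at hT
      rw [List.range'_succ, List.foldl_cons, aBody_step n K T' z a (by omega)]
      rw [combine_step]
      by_cases hh : combHead a T' = 0
      · rw [if_neg (not_not_intro hh)]
        have h2 := ih (combTail a T') K (z + 1)
          (by rw [combTail_length]; exact hT) (by omega)
        have harg : K.length + (z + 1) = K.length + z + 1 := by omega
        rw [harg] at h2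
        rw [h2]
        have hf : List.filter (fun x => decide (x ≠ 0))
            (combHead a T' :: combine (combTail a T'))
            = List.filter (fun x => decide (x ≠ 0)) (combine (combTail a T')) := by
          simp [hh]
        rw [hf]
        have hz : z + 1 + m = z + (m + 1) := by omega
        rw [hz]
      · rw [if_pos hh]
        have h2 := ih (combTail a T') (K ++ [combHead a T']) z
          (by rw [combTail_length]; exact hT) (by simp; omega)
        have hlen : (K ++ [combHead a T']).length = K.length + 1 := by simp
        have harg2 : K.length + 1 + z = K.length + z + 1 := by omega
        rw [hlen, harg2] at h2
        rw [h2]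
        have hf : List.filter (fun x => decide (x ≠ 0))
            (combHead a T' :: combine (combTail a T'))
            = combHead a T' :: List.filter (fun x => decide (x ≠ 0)) (combine (combTail a T')) := by
          simp [hh]
        rw [hf]
        simp only [Prod.mk.injEq]
        constructor
        · simp [List.append_assoc]
          omega
        · simp only [List.length_cons]
          omega

-- ===== VERDICT (by name: the statement is the Claim_ definition above) =====
theorem apply_operations_2_spec : Claim_equal_apply_operations_2 := by
  intro nums _
  unfold Spec_apply_operations_2 apply_operations_2 apply_operations_2_alt
  rw [combinePass_eq_combine]
  have h := loop_inv nums.length nums.length nums [] 0 rfl (by simp)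
  simp only [List.range_eq_range'] at *
  simp at h
  rw [h]
  simp
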